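-- pv_equiv track=rewrite | github.com/SobinYim/Algorithm | [Programmers] Lv1/공원 산책.py | solution
-- ===== SOURCE A (Python) =====
-- def solution(park, routes): #공원을 나타내는 문자열 배열, 수행할 명령
--     for idx,m in enumerate(park): #시작 지점 탐색
--         park[idx]=list(m)
--         if (s:=m.find("S"))!=-1:
--             x,y=[s,idx]
--             break
--     h,w=len(park),len(park[0]) #높이, 폭
--     for r in routes:
--         op,n=r.split() #방향, 거리
--         n=int(n)
--         if op=="N": #북쪽으로 이동
--             if y-n<0: #도착 지점이 유효한지
--                 continue
--             for i in range(y-n,y): #경로가 유효한지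
--                 if park[i][x]=="X":
--                     break
--             else:
--                 y-=n
--         elif op=="S": #남쪽으로 이동
--             if h<=y+n:
--                 continue
--             for i in range(y+1,y+n+1):
--                 if park[i][x]=="X":
--                     break
--             else:
--                 y+=n
--         elif op=="E": #동쪽으로 이동
--             if w<=x+n:
--                 continue
--             if "X" not in park[y][x+1:x+n+1]:
--                 x+=n
--         else: #서쪽으로 이동
--             if x-n<0:
--                 continue
--             if "X" not in park[y][x-n:x]:
--                 x-=n
--     return [y,x]
-- ===== SOURCE B (Python) =====
-- def solution(park, routes):
--     # same start scan as the task requires (keeps A's in-place row conversion)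
--     for idx, m in enumerate(park):
--         park[idx] = list(m)
--         s = m.find("S")
--         if s != -1:
--             x, y = s, idx
--             break
--     h, w = len(park), len(park[0])
--
--     def prefixes(cells):
--         acc, out = 0, [0]
--         for ch in cells:
--             acc += ch == "X"
--             out.append(acc)
--         return out
--
--     # prefix-sum tables of obstacle counts: per row and per column
--     row_pref = [prefixes(row) for row in park]
--     # a cell beyond a short row is open ground '.' (it can never hide an 'X')
--     col_pref = [prefixes([park[r][c] if c < len(park[r]) else "." for r in range(h)])
--                 for c in range(w)]
--
--     for rt in routes:
--         op, ns = rt.split()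
--         n = int(ns)
--         if op == "N":
--             if y - n >= 0 and col_pref[x][y] - col_pref[x][y - n] == 0:
--                 y -= n
--         elif op == "S":
--             if y + n < h and col_pref[x][y + n + 1] - col_pref[x][y + 1] == 0:
--                 y += n
--         elif op == "E":
--             if x + n < w and row_pref[y][x + n + 1] - row_pref[y][x + 1] == 0:
--                 x += n
--         else:
--             if x - n >= 0 and row_pref[y][x] - row_pref[y][x - n] == 0:
--                 x -= n
--     return [y, x]
-- ===== Notes on version B (the rewrite author's own statement) =====
-- stated objective: alternative
-- what changed: B precomputes per-row and per-column prefix-sum tables of obstacle counts once, so each route's path check is a single O(1) subtraction instead of A's cell-by-cell scan of the traversed segment.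
-- outside the precondition, e.g. on solution(['S', 'X', '.'], ['N -2']): A returns [2, 0], B returns [0, 0]; on solution(['abc', 'S'], ['E 1']): A returns [1, 1], B raises IndexError
import Mathlib
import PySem

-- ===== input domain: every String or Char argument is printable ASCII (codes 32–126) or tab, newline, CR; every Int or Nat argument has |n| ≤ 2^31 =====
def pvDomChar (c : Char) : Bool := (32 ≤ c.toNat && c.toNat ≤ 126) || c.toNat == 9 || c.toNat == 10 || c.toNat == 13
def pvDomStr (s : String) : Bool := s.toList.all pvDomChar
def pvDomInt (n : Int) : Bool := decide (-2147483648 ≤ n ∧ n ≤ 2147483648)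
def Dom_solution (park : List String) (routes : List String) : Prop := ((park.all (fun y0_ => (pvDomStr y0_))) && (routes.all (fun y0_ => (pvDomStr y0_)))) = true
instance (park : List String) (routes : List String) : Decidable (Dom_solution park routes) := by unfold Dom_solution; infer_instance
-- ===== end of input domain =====

-- B replaces A's per-route cell-by-cell path scans by prefix-sum tables of obstacle counts
-- (one per row, one per column), so each route is checked by a single subtraction; return value
-- only — A (and B) mutate `park` in place in Python (rows up to the 'S' row become lists of the
-- same characters), which a Lean port cannot and need not express.

-- ===== PORT A =====
-- start-scan loop: for idx,m in enumerate(park): … if (s:=m.find("S"))!=-1: x,y=[s,idx]; break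
def pvA_findS : List String → Int → Option (Int × Int)
  | [], _ => none
  | m :: rest, idx =>
      if PySem.Str.find m "S" ≠ -1 then some (PySem.Str.find m "S", idx)
      else pvA_findS rest (idx + 1)

-- park[i][x]; none where Python raises IndexError (outside Pre_)
def pvA_cell? (park : List String) (i x : Int) : Option Char :=
  match PySem.List.pyGet? park i with
  | some row => PySem.Str.pyGet? row x
  | none => none

-- for i in range(lo,hi): if park[i][x]=="X": break / else: …  — true = loop fell through (path clear)
def pvA_scan (park : List String) (x : Int) : List Int → Bool
  | [] => true
  | i :: rest =>
      match pvA_cell? park i x with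
      | some c => if c = 'X' then false else pvA_scan park x rest
      | none => false   -- Python raises IndexError here (outside Pre_)

def pvA_step (park : List String) (hh ww : Int) (st : Int × Int) (r : String) : Int × Int :=
  match PySem.Str.split₀ r with
  | [op, ns] =>
      match PySem.Int.ofStr? ns with
      | some n =>
          if op = "N" then
            if st.2 - n < 0 then st
            else if pvA_scan park st.1 (PySem.List.pyRange (st.2 - n) st.2 1) then (st.1, st.2 - n) else st
          else if op = "S" then
            if hh ≤ st.2 + n then st
            else if pvA_scan park st.1 (PySem.List.pyRange (st.2 + 1) (st.2 + n + 1) 1) then (st.1, st.2 + n) else st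
          else if op = "E" then
            if ww ≤ st.1 + n then st
            else if PySem.Str.isIn "X" (PySem.Str.slice (PySem.List.pyGetD park st.2 "") (some (st.1 + 1)) (some (st.1 + n + 1))) then st
            else (st.1 + n, st.2)
          else
            if st.1 - n < 0 then st
            else if PySem.Str.isIn "X" (PySem.Str.slice (PySem.List.pyGetD park st.2 "") (some (st.1 - n)) (some st.1)) then st
            else (st.1 - n, st.2)
      | none => st      -- int(ns) raises ValueError (outside Pre_)
  | _ => st             -- 'op,n = r.split()' raises ValueError (outside Pre_)

def solution (park : List String) (routes : List String) : List Int :=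
  match pvA_findS park 0 with
  | none => []          -- Python raises (NameError / IndexError on park[0]) — outside Pre_
  | some (x0, y0) =>
      let hh : Int := park.length
      let ww : Int := PySem.Str.len (PySem.List.pyGetD park 0 "")
      let st := routes.foldl (pvA_step park hh ww) (x0, y0)
      [st.2, st.1]

-- ===== PORT B =====
-- same start scan as A (Source B keeps it, including the in-place conversion, a no-op on values)
def pvB_findS : List String → Int → Option (Int × Int)
  | [], _ => none
  | m :: rest, idx =>
      if PySem.Str.find m "S" ≠ -1 then some (PySem.Str.find m "S", idx)
      else pvB_findS rest (idx + 1)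

-- def prefixes(cells): acc,out = 0,[0]; for ch in cells: acc += ch=="X"; out.append(acc); return out
def pvB_prefixes (cells : List Char) : List Int :=
  (cells.foldl
    (fun (p : Int × List Int) ch =>
      (p.1 + (if ch = 'X' then 1 else 0), p.2 ++ [p.1 + (if ch = 'X' then 1 else 0)]))
    (0, [0])).2

-- park[r][c] if c < len(park[r]) else "." — a cell beyond a short row is open ground
def pvB_cell (park : List String) (r c : Int) : Char :=
  if c < PySem.Str.len (PySem.List.pyGetD park r "") then
    (PySem.Str.pyGet? (PySem.List.pyGetD park r "") c).getD '?'
  else '.'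

def pvB_step (hh ww : Int) (rowPref colPref : List (List Int)) (st : Int × Int) (rt : String) : Int × Int :=
  match PySem.Str.split₀ rt with
  | [op, ns] =>
      match PySem.Int.ofStr? ns with
      | some n =>
          if op = "N" then
            if 0 ≤ st.2 - n ∧ PySem.List.pyGetD (PySem.List.pyGetD colPref st.1 []) st.2 0
                - PySem.List.pyGetD (PySem.List.pyGetD colPref st.1 []) (st.2 - n) 0 = 0
            then (st.1, st.2 - n) else st
          else if op = "S" then
            if st.2 + n < hh ∧ PySem.List.pyGetD (PySem.List.pyGetD colPref st.1 []) (st.2 + n + 1) 0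
                - PySem.List.pyGetD (PySem.List.pyGetD colPref st.1 []) (st.2 + 1) 0 = 0
            then (st.1, st.2 + n) else st
          else if op = "E" then
            if st.1 + n < ww ∧ PySem.List.pyGetD (PySem.List.pyGetD rowPref st.2 []) (st.1 + n + 1) 0
                - PySem.List.pyGetD (PySem.List.pyGetD rowPref st.2 []) (st.1 + 1) 0 = 0
            then (st.1 + n, st.2) else st
          else
            if 0 ≤ st.1 - n ∧ PySem.List.pyGetD (PySem.List.pyGetD rowPref st.2 []) st.1 0
                - PySem.List.pyGetD (PySem.List.pyGetD rowPref st.2 []) (st.1 - n) 0 = 0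
            then (st.1 - n, st.2) else st
      | none => st      -- outside Pre_
  | _ => st             -- outside Pre_

def solution_alt (park : List String) (routes : List String) : List Int :=
  match pvB_findS park 0 with
  | none => []          -- outside Pre_
  | some (x0, y0) =>
      let hh : Int := park.length
      let ww : Int := PySem.Str.len (PySem.List.pyGetD park 0 "")
      let rowPref := park.map (fun row => pvB_prefixes row.toList)
      let colPref := (PySem.List.pyRange 0 ww 1).map (fun c =>
          pvB_prefixes ((PySem.List.pyRange 0 hh 1).map (fun r => pvB_cell park r c)))
      let st := routes.foldl (pvB_step hh ww rowPref colPref) (x0, y0)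
      [st.2, st.1]

-- ===== PRECONDITION & SPEC =====
-- a route Python accepts: splits into exactly two words, the second a valid int literal, here ≥ 0
def pvRouteOk (r : String) : Bool :=
  match PySem.Str.split₀ r with
  | [_, ns] =>
      match PySem.Int.ofStr? ns with
      | some n => decide (0 ≤ n)
      | none => false
  | _ => false

-- Pre_ excludes: parks that are empty or contain no 'S' (A raises NameError/IndexError), routes that do
-- not parse as two words with an int (A raises ValueError), negative distances (outside the natural
-- grid-walk domain: A's scan ranges are then empty and the robot can leave the grid), and — only when
-- there are moves to perform — parks with a row shorter than row 0 or an 'S' at a column ≥ the width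
-- len(park[0]), on which A can raise IndexError mid-walk.
def Pre_solution (park : List String) (routes : List String) : Prop :=
  park ≠ [] ∧
  (∃ m ∈ park, PySem.Str.find m "S" ≠ -1) ∧
  (∀ r ∈ routes, pvRouteOk r = true) ∧
  (routes = [] ∨
    ((∀ m ∈ park, PySem.Str.len (park.headD "") ≤ PySem.Str.len m) ∧
     (∀ m ∈ park, PySem.Str.find m "S" < PySem.Str.len (park.headD ""))))

instance (park : List String) (routes : List String) : Decidable (Pre_solution park routes) := by
  unfold Pre_solution; infer_instance

def pvWitness_solution : List String × List String := (["S.X", "..X", "..."], ["E 1", "S 2", "W 1"])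

def Spec_solution (park : List String) (routes : List String) (out : List Int) : Prop := out = solution_alt park routes
instance (park : List String) (routes : List String) (out : List Int) : Decidable (Spec_solution park routes out) := by unfold Spec_solution; infer_instance

-- ===== CLAIM (what is proved, stated in full; the proofs are below) =====
def Claim_equal_solution : Prop := ∀ (park : List String) (routes : List String), Dom_solution park routes → Pre_solution park routes → Spec_solution park routes (solution park routes)

-- ===== LEMMAS AND PROOFS =====

-- the character grid both programs read
def pvCellG (park : List String) (r c : Nat) : Char :=
  ((park.getD r "").toList.getD c '?')

-- abbreviations used only in the proofs
def pvW (park : List String) : Nat := (park.headD "").toList.length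
def pvRect (park : List String) : Prop := ∀ m ∈ park, pvW park ≤ m.toList.length

theorem findS_eq (l : List String) (i : Int) : pvB_findS l i = pvA_findS l i := by
  induction l generalizing i with
  | nil => rfl
  | cons m rest ih => simp only [pvA_findS, pvB_findS, ih]

theorem findS_some (l : List String) (i : Int) (h : ∃ m ∈ l, PySem.Str.find m "S" ≠ -1) :
    (pvA_findS l i).isSome := by
  induction l generalizing i with
  | nil => simp at h
  | cons m rest ih =>
      by_cases hm : PySem.Chars.find m.toList ['S'] = -1
      · rcases h with ⟨m', hm', hf⟩
        simp only [PySem.Str.find_eq] at hf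
        rcases List.mem_cons.1 hm' with rfl | hmem
        · simp at hf; exact absurd hm hf
        · simp [pvA_findS, hm]
          exact ih _ ⟨m', hmem, by simpa using hf⟩
      · simp [pvA_findS, hm]

theorem findS_spec (l : List String) (i : Int) (x y : Int)
    (h : pvA_findS l i = some (x, y)) :
    ∃ k : Nat, k < l.length ∧ y = i + k ∧
      x = PySem.Str.find (l.getD k "") "S" ∧ PySem.Str.find (l.getD k "") "S" ≠ -1 := by
  induction l generalizing i with
  | nil => simp [pvA_findS] at h
  | cons m rest ih =>
      by_cases hm : PySem.Chars.find m.toList ['S'] = -1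
      · simp only [pvA_findS] at h
        rw [if_neg (by simpa using hm)] at h
        rcases ih (i + 1) h with ⟨k, hk, hy, hx, hne⟩
        exact ⟨k + 1, by simpa using hk, by omega, by simpa using hx, by simpa using hne⟩
      · simp [pvA_findS, hm] at h
        refine ⟨0, by simp, by omega, by simp [← h.1], by simpa using hm⟩

theorem find_S_bounds (m : String) (h : PySem.Str.find m "S" ≠ -1) :
    0 ≤ PySem.Str.find m "S" ∧ PySem.Str.find m "S" < m.toList.length := by
  have hS : "S".toList = ['S'] := rfl
  simp only [PySem.Str.find_eq, hS] at *
  have hinf : ['S'] <:+: m.toList := by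
    have := (PySem.Chars.find_ne_neg_one_iff m.toList ['S']).1 h
    simpa [hS] using this
  have h0 : 0 ≤ PySem.Chars.find m.toList ['S'] := by
    have := (PySem.Chars.find_nonneg_iff m.toList ['S']).2 (by simpa [hS] using hinf)
    simpa [hS] using this
  have hsp := (PySem.Chars.find_spec (s := m.toList) (sub := ['S']) h0).1
  refine ⟨h0, ?_⟩
  have hlen : (1 : Nat) ≤ (m.toList.drop (PySem.Chars.find m.toList ['S']).toNat).length := by
    simpa using hsp.length_le
  rw [List.length_drop] at hlen
  have ht := Int.toNat_of_nonneg h0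
  omega

-- ===== pvB_prefixes characterised =====
theorem prefixes_aux (cells : List Char) (acc : Int) (out : List Int) :
    (cells.foldl
      (fun (p : Int × List Int) ch =>
        (p.1 + (if ch = 'X' then 1 else 0), p.2 ++ [p.1 + (if ch = 'X' then 1 else 0)]))
      (acc, out)).2 = out ++ (List.range cells.length).map
        (fun j => acc + (((cells.take (j + 1)).countP (· = 'X') : Nat) : Int)) := by
  induction cells generalizing acc out with
  | nil => simp
  | cons ch cs ih =>
      simp only [List.foldl_cons]
      rw [ih, List.length_cons, List.range_succ_eq_map, List.append_assoc]
      congr 1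
      simp only [List.map_cons, List.map_map, List.singleton_append,
        List.take_succ_cons, List.countP_cons, List.take_zero, List.countP_nil]
      congr 1
      · simp
      · apply List.map_congr_left
        intro j _
        simp only [Function.comp_apply, decide_eq_true_eq]
        push_cast
        split_ifs <;> ring

theorem prefixes_eq (cells : List Char) :
    pvB_prefixes cells = 0 :: (List.range cells.length).map
      (fun j => (((cells.take (j + 1)).countP (· = 'X') : Nat) : Int)) := by
  unfold pvB_prefixes
  rw [prefixes_aux]
  simp

theorem prefixes_length (cells : List Char) : (pvB_prefixes cells).length = cells.length + 1 := by
  rw [prefixes_eq]; simp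

theorem prefixes_getD (cells : List Char) (k : Nat) (hk : k ≤ cells.length) :
    (pvB_prefixes cells).getD k 0 = (((cells.take k).countP (· = 'X') : Nat) : Int) := by
  rw [prefixes_eq]
  cases k with
  | zero => simp
  | succ j =>
      have hj : j < cells.length := by omega
      simp only [List.getD_cons_succ]
      rw [List.getD_eq_getElem _ _ (by simpa using hj)]
      simp

theorem prefixes_pyGetD (cells : List Char) (i : Int) (h0 : 0 ≤ i) (hi : i ≤ (cells.length : Int)) :
    PySem.List.pyGetD (pvB_prefixes cells) i 0 = (pvB_prefixes cells).getD i.toNat 0 := by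
  rw [PySem.List.pyGetD_eq_getElem _ _ h0 (by rw [prefixes_length]; push_cast; omega)]
  rw [List.getD_eq_getElem _ _ (by rw [prefixes_length]; omega)]

theorem prefixes_seg (cells : List Char) (a b : Nat) (hab : a ≤ b) (hb : b ≤ cells.length) :
    (pvB_prefixes cells).getD b 0 - (pvB_prefixes cells).getD a 0 =
      ((((cells.drop a).take (b - a)).countP (· = 'X') : Nat) : Int) := by
  rw [prefixes_getD cells a (by omega), prefixes_getD cells b hb]
  have hsplit : cells.take b = cells.take a ++ (cells.drop a).take (b - a) := by
    conv_lhs => rw [show b = a + (b - a) by omega]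
    exact List.take_add ..
  rw [hsplit, List.countP_append]
  push_cast
  ring

theorem seg_zero_iff (cells : List Char) (a b : Nat) (hab : a ≤ b) (hb : b ≤ cells.length) :
    ((pvB_prefixes cells).getD b 0 - (pvB_prefixes cells).getD a 0 = 0 ↔
      ∀ j : Nat, a ≤ j → j < b → cells.getD j '?' ≠ 'X') := by
  rw [prefixes_seg cells a b hab hb]
  rw [Int.natCast_eq_zero, List.countP_eq_zero]
  constructor
  · intro H j hja hjb
    have hj : j < cells.length := by omega
    have hmem : cells[j] ∈ (cells.drop a).take (b - a) := by
      have : ((cells.drop a).take (b - a))[j - a]'(by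
        simp [List.length_take, List.length_drop]; omega) = cells[j] := by
        rw [List.getElem_take, List.getElem_drop]
        congr 1; omega
      rw [← this]
      exact List.getElem_mem _
    have := H _ hmem
    rw [List.getD_eq_getElem _ _ hj]
    simpa using this
  · intro H c hc
    rcases List.mem_iff_getElem.1 hc with ⟨i, hi, rfl⟩
    have hlen : i < b - a := by
      have := hi; simp [List.length_take, List.length_drop] at this; omega
    rw [List.getElem_take, List.getElem_drop]
    have hab2 : a + i < cells.length := by omega
    have := H (a + i) (by omega) (by omega)
    rw [List.getD_eq_getElem _ _ hab2] at this
    simpa using this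

-- ===== the grid both programs read =====
theorem cellA_eq (park : List String) (hrect : pvRect park) (i x : Int)
    (hi0 : 0 ≤ i) (hi1 : i < (park.length : Int)) (hx0 : 0 ≤ x) (hx1 : x < (pvW park : Int)) :
    pvA_cell? park i x = some (pvCellG park i.toNat x.toNat) := by
  have hiN : i.toNat < park.length := by omega
  unfold pvA_cell?
  rw [PySem.List.pyGet?_eq_some_getElem park hi0 hi1]
  have hrow : pvW park ≤ (park[i.toNat]).toList.length := hrect _ (List.getElem_mem _)
  show PySem.Str.pyGet? (park[i.toNat]) x = some (pvCellG park i.toNat x.toNat)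
  rw [PySem.Str.pyGet?_eq]
  rw [show PySem.Chars.pyGet? (park[i.toNat]).toList x = PySem.List.pyGet? (park[i.toNat]).toList x from rfl]
  rw [PySem.List.pyGet?_eq_some_getElem _ hx0 (by omega)]
  unfold pvCellG
  rw [List.getD_eq_getElem park _ hiN]
  rw [List.getD_eq_getElem _ _ (by omega)]

theorem cellB_eq (park : List String) (hrect : pvRect park) (i x : Int)
    (hi0 : 0 ≤ i) (hi1 : i < (park.length : Int)) (hx0 : 0 ≤ x) (hx1 : x < (pvW park : Int)) :
    pvB_cell park i x = pvCellG park i.toNat x.toNat := by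
  have hiN : i.toNat < park.length := by omega
  unfold pvB_cell
  rw [PySem.List.pyGetD_eq_getElem _ _ hi0 hi1]
  have hrow : pvW park ≤ (park[i.toNat]).toList.length := hrect _ (List.getElem_mem _)
  rw [if_pos (by rw [PySem.Str.len_eq]; omega)]
  rw [PySem.Str.pyGet?_eq]
  rw [show PySem.Chars.pyGet? (park[i.toNat]).toList x = PySem.List.pyGet? (park[i.toNat]).toList x from rfl]
  rw [PySem.List.pyGet?_eq_some_getElem _ hx0 (by omega)]
  unfold pvCellG
  rw [List.getD_eq_getElem park _ hiN]
  rw [List.getD_eq_getElem _ _ (by omega)]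
  rfl

-- ===== A's break-scan characterised =====
theorem scan_iff (park : List String) (hrect : pvRect park) (x a b : Int)
    (hx0 : 0 ≤ x) (hx1 : x < (pvW park : Int)) (ha : 0 ≤ a) (hb : b ≤ (park.length : Int)) :
    (pvA_scan park x (PySem.List.pyRange a b 1) = true ↔
      ∀ i : Int, a ≤ i → i < b → pvCellG park i.toNat x.toNat ≠ 'X') := by
  have main : ∀ (n : Nat) (a : Int), 0 ≤ a → (b - a).toNat = n →
      (pvA_scan park x (PySem.List.pyRange a b 1) = true ↔
        ∀ i : Int, a ≤ i → i < b → pvCellG park i.toNat x.toNat ≠ 'X') := by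
    intro n
    induction n with
    | zero =>
        intro a ha0 hfuel
        have hba : b ≤ a := by omega
        rw [PySem.List.pyRange_one_eq_nil hba]
        simp only [pvA_scan, true_iff]
        intro i h1 h2
        exact absurd (h1.trans_lt h2) (not_lt.2 hba)
    | succ n ih =>
        intro a ha0 hfuel
        have hab : a < b := by omega
        rw [PySem.List.pyRange_one_cons hab]
        have hc := cellA_eq park hrect a x ha0 (by omega) hx0 hx1
        simp only [pvA_scan, hc]
        by_cases hX : pvCellG park a.toNat x.toNat = 'X'
        · rw [if_pos hX]
          simp only [Bool.false_eq_true, false_iff]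
          intro H
          exact H a le_rfl hab hX
        · rw [if_neg hX]
          rw [ih (a + 1) (by omega) (by omega)]
          constructor
          · intro H i h1 h2
            rcases eq_or_lt_of_le h1 with rfl | hlt
            · exact hX
            · exact H i (by omega) h2
          · intro H i h1 h2
            exact H i (by omega) h2
  exact main (b - a).toNat a ha rfl

-- ===== B's table accesses =====
def pvColChars (park : List String) (x : Int) : List Char :=
  (PySem.List.pyRange 0 (park.length : Int) 1).map (fun r => pvB_cell park r x)

theorem colChars_length (park : List String) (x : Int) :
    (pvColChars park x).length = park.length := by
  simp [pvColChars, PySem.List.length_pyRange_one]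

theorem colChars_getD (park : List String) (hrect : pvRect park) (x : Int)
    (hx0 : 0 ≤ x) (hx1 : x < (pvW park : Int)) (j : Nat) (hj : j < park.length) :
    (pvColChars park x).getD j '?' = pvCellG park j x.toNat := by
  rw [List.getD_eq_getElem _ _ (by rw [colChars_length]; exact hj)]
  unfold pvColChars
  rw [List.getElem_map, PySem.List.getElem_pyRange_one]
  rw [show ((0 : Int) + (j : Int)) = (j : Int) by ring]
  rw [cellB_eq park hrect _ x (by positivity) (by exact_mod_cast hj) hx0 hx1]
  simp

theorem rowPref_at (park : List String) (y : Int) (h0 : 0 ≤ y) (h1 : y < (park.length : Int)) :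
    PySem.List.pyGetD (park.map (fun row => pvB_prefixes row.toList)) y [] =
      pvB_prefixes ((park.getD y.toNat "").toList) := by
  rw [PySem.List.pyGetD_eq_getElem _ _ h0 (by simpa using h1), List.getElem_map]
  congr 2
  rw [List.getD_eq_getElem park _ (by omega)]

theorem rowAt_eq (park : List String) (y : Int) (h0 : 0 ≤ y) (h1 : y < (park.length : Int)) :
    PySem.List.pyGetD park y "" = park.getD y.toNat "" := by
  rw [PySem.List.pyGetD_eq_getElem _ _ h0 h1, List.getD_eq_getElem park _ (by omega)]

theorem colPref_at (park : List String) (w : Int) (x : Int) (h0 : 0 ≤ x) (h1 : x < w) :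
    PySem.List.pyGetD ((PySem.List.pyRange 0 w 1).map (fun c =>
        pvB_prefixes ((PySem.List.pyRange 0 (park.length : Int) 1).map (fun r => pvB_cell park r c)))) x [] =
      pvB_prefixes (pvColChars park x) := by
  exact PySem.List.pyGetD_map_pyRange_of_nonneg _ w x [] h0 h1

-- the Int-level segment test of B, related to A's scan (column case)
theorem col_seg_iff (park : List String) (hrect : pvRect park) (x a b : Int)
    (hx0 : 0 ≤ x) (hx1 : x < (pvW park : Int)) (ha : 0 ≤ a) (hab : a ≤ b) (hb : b ≤ (park.length : Int)) :
    (PySem.List.pyGetD (pvB_prefixes (pvColChars park x)) b 0 -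
      PySem.List.pyGetD (pvB_prefixes (pvColChars park x)) a 0 = 0 ↔
      pvA_scan park x (PySem.List.pyRange a b 1) = true) := by
  have hlen := colChars_length park x
  rw [prefixes_pyGetD _ a ha (by rw [hlen]; omega), prefixes_pyGetD _ b (by omega) (by rw [hlen]; omega)]
  rw [seg_zero_iff _ a.toNat b.toNat (by omega) (by rw [hlen]; omega)]
  rw [scan_iff park hrect x a b hx0 hx1 ha hb]
  constructor
  · intro H i h1 h2
    have := H i.toNat (by omega) (by omega)
    rwa [colChars_getD park hrect x hx0 hx1 i.toNat (by omega)] at this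
  · intro H j h1 h2
    rw [colChars_getD park hrect x hx0 hx1 j (by omega)]
    have := H (j : Int) (by omega) (by omega)
    simpa using this

-- the row-segment test of B versus A's slice membership test (east/west case)
theorem row_seg_iff (park : List String) (hrect : pvRect park) (y a b : Int)
    (hy0 : 0 ≤ y) (hy1 : y < (park.length : Int)) (ha : 0 ≤ a) (hab : a ≤ b)
    (hb : b ≤ (pvW park : Int)) :
    (PySem.List.pyGetD (pvB_prefixes ((park.getD y.toNat "").toList)) b 0 -
      PySem.List.pyGetD (pvB_prefixes ((park.getD y.toNat "").toList)) a 0 = 0 ↔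
      ¬ PySem.Str.isIn "X" (PySem.Str.slice (PySem.List.pyGetD park y "") (some a) (some b)) = true) := by
  have hyN : y.toNat < park.length := by omega
  have hrow : pvW park ≤ (park.getD y.toNat "").toList.length := by
    rw [List.getD_eq_getElem park _ hyN]
    exact hrect _ (List.getElem_mem _)
  rw [prefixes_pyGetD _ a ha (by omega), prefixes_pyGetD _ b (by omega) (by omega)]
  rw [prefixes_seg _ a.toNat b.toNat (by omega) (by omega)]
  rw [PySem.Str.isIn_iff_infix, PySem.Str.toList_slice, rowAt_eq park y hy0 hy1]
  rw [show PySem.Chars.slice (park.getD y.toNat "").toList (some a) (some b) =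
        PySem.List.slice (park.getD y.toNat "").toList (some a) (some b) from rfl]
  rw [PySem.List.slice_toNat _ ha (by omega)]
  rw [show ("X".toList) = ['X'] from rfl, List.singleton_infix_iff]
  rw [Int.natCast_eq_zero, List.countP_eq_zero]
  constructor
  · intro H hmem
    exact H 'X' hmem (by simp)
  · intro H c hc hcX
    simp only [decide_eq_true_eq] at hcX
    subst hcX
    exact H hc

-- ===== per-route step: equality and bounds =====
theorem step_eq (park : List String) (hrect : pvRect park) (r : String)
    (hr : pvRouteOk r = true) (st : Int × Int)
    (hx0 : 0 ≤ st.1) (hx1 : st.1 < (pvW park : Int))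
    (hy0 : 0 ≤ st.2) (hy1 : st.2 < (park.length : Int)) :
    pvB_step (park.length : Int) (pvW park : Int)
        (park.map (fun row => pvB_prefixes row.toList))
        ((PySem.List.pyRange 0 ((pvW park : Int)) 1).map (fun c =>
          pvB_prefixes ((PySem.List.pyRange 0 (park.length : Int) 1).map (fun r => pvB_cell park r c)))) st r =
      pvA_step park (park.length : Int) (pvW park : Int) st r := by
  unfold pvRouteOk at hr
  rcases hsp : PySem.Str.split₀ r with _ | ⟨op, _ | ⟨ns, _ | _⟩⟩ <;> rw [hsp] at hr <;> try simp at hr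
  rcases hn : PySem.Int.ofStr? ns with _ | n <;> rw [hn] at hr
  · simp at hr
  have hn0 : 0 ≤ n := by simpa using hr
  simp only [pvA_step, pvB_step, hsp, hn]
  by_cases hN : op = "N"
  · simp only [hN, if_true]
    by_cases h1 : st.2 - n < 0
    · rw [if_pos h1, if_neg (by intro h; exact absurd h.1 (by omega))]
    · rw [if_neg h1]
      rw [colPref_at park _ st.1 hx0 hx1]
      have hiff := col_seg_iff park hrect st.1 (st.2 - n) st.2 hx0 hx1 (by omega) (by omega) (by omega)
      by_cases h2 : pvA_scan park st.1 (PySem.List.pyRange (st.2 - n) st.2 1) = true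
      · rw [if_pos h2, if_pos ⟨by omega, hiff.2 h2⟩]
      · rw [if_neg h2, if_neg (by intro h; exact h2 (hiff.1 h.2))]
  · simp only [hN, reduceIte]
    by_cases hS : op = "S"
    · simp only [hS, reduceIte]
      by_cases h1 : (park.length : Int) ≤ st.2 + n
      · rw [if_pos h1, if_neg (by intro h; exact absurd h.1 (by omega))]
      · rw [if_neg h1]
        rw [colPref_at park _ st.1 hx0 hx1]
        have hiff := col_seg_iff park hrect st.1 (st.2 + 1) (st.2 + n + 1) hx0 hx1 (by omega) (by omega) (by omega)
        by_cases h2 : pvA_scan park st.1 (PySem.List.pyRange (st.2 + 1) (st.2 + n + 1) 1) = true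
        · rw [if_pos h2, if_pos ⟨by omega, hiff.2 h2⟩]
        · rw [if_neg h2, if_neg (by intro h; exact h2 (hiff.1 h.2))]
    · simp only [hS, reduceIte]
      by_cases hE : op = "E"
      · simp only [hE, reduceIte]
        by_cases h1 : (pvW park : Int) ≤ st.1 + n
        · rw [if_pos h1, if_neg (by intro h; exact absurd h.1 (by omega))]
        · rw [if_neg h1]
          rw [rowPref_at park st.2 hy0 hy1]
          have hiff := row_seg_iff park hrect st.2 (st.1 + 1) (st.1 + n + 1) hy0 hy1 (by omega) (by omega) (by omega)
          by_cases h2 : PySem.Str.isIn "X" (PySem.Str.slice (PySem.List.pyGetD park st.2 "") (some (st.1 + 1)) (some (st.1 + n + 1))) = true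
          · rw [if_pos h2, if_neg (by intro h; exact (hiff.1 h.2) h2)]
          · rw [if_neg h2, if_pos ⟨by omega, hiff.2 h2⟩]
      · simp only [hE, reduceIte]
        by_cases h1 : st.1 - n < 0
        · rw [if_pos h1, if_neg (by intro h; exact absurd h.1 (by omega))]
        · rw [if_neg h1]
          rw [rowPref_at park st.2 hy0 hy1]
          have hiff := row_seg_iff park hrect st.2 (st.1 - n) st.1 hy0 hy1 (by omega) (by omega) (by omega)
          by_cases h2 : PySem.Str.isIn "X" (PySem.Str.slice (PySem.List.pyGetD park st.2 "") (some (st.1 - n)) (some st.1)) = true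
          · rw [if_pos h2, if_neg (by intro h; exact (hiff.1 h.2) h2)]
          · rw [if_neg h2, if_pos ⟨by omega, hiff.2 h2⟩]

theorem stepA_bounds (park : List String) (r : String) (hr : pvRouteOk r = true) (st : Int × Int)
    (hx0 : 0 ≤ st.1) (hx1 : st.1 < (pvW park : Int))
    (hy0 : 0 ≤ st.2) (hy1 : st.2 < (park.length : Int)) :
    0 ≤ (pvA_step park (park.length : Int) (pvW park : Int) st r).1 ∧
    (pvA_step park (park.length : Int) (pvW park : Int) st r).1 < (pvW park : Int) ∧
    0 ≤ (pvA_step park (park.length : Int) (pvW park : Int) st r).2 ∧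
    (pvA_step park (park.length : Int) (pvW park : Int) st r).2 < (park.length : Int) := by
  unfold pvRouteOk at hr
  rcases hsp : PySem.Str.split₀ r with _ | ⟨op, _ | ⟨ns, _ | _⟩⟩ <;> rw [hsp] at hr <;> try simp at hr
  rcases hn : PySem.Int.ofStr? ns with _ | n <;> rw [hn] at hr
  · simp at hr
  have hn0 : 0 ≤ n := by simpa using hr
  simp only [pvA_step, hsp, hn]
  split_ifs <;> (try simp) <;> omega

-- ===== the route fold =====
theorem fold_eq (park : List String) (hrect : pvRect park) (routes : List String)
    (hroutes : ∀ r ∈ routes, pvRouteOk r = true) (st : Int × Int)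
    (hx0 : 0 ≤ st.1) (hx1 : st.1 < (pvW park : Int))
    (hy0 : 0 ≤ st.2) (hy1 : st.2 < (park.length : Int)) :
    routes.foldl (pvB_step (park.length : Int) (pvW park : Int)
        (park.map (fun row => pvB_prefixes row.toList))
        ((PySem.List.pyRange 0 ((pvW park : Int)) 1).map (fun c =>
          pvB_prefixes ((PySem.List.pyRange 0 (park.length : Int) 1).map (fun r => pvB_cell park r c))))) st =
      routes.foldl (pvA_step park (park.length : Int) (pvW park : Int)) st := by
  induction routes generalizing st with
  | nil => rfl
  | cons r rest ih =>
      have hr := hroutes r (List.mem_cons_self ..)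
      simp only [List.foldl_cons]
      rw [step_eq park hrect r hr st hx0 hx1 hy0 hy1]
      have hb := stepA_bounds park r hr st hx0 hx1 hy0 hy1
      exact ih (fun r' hr' => hroutes r' (List.mem_cons_of_mem _ hr')) _ hb.1 hb.2.1 hb.2.2.1 hb.2.2.2

-- width of the park as the ports compute it
theorem ww_eq (park : List String) (hne : park ≠ []) :
    PySem.Str.len (PySem.List.pyGetD park 0 "") = ((pvW park : Nat) : Int) := by
  cases park with
  | nil => exact absurd rfl hne
  | cons m rest => simp [PySem.List.pyGetD_zero_cons, pvW, PySem.Str.len_eq]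

-- ===== VERDICT (by name: the statement is the Claim_ definition above) =====
theorem solution_spec : Claim_equal_solution := by
  unfold Claim_equal_solution
  intro park routes _ hpre
  unfold Spec_solution
  obtain ⟨hne, hS, hroutes, hdis⟩ := hpre
  have hsome := findS_some park 0 hS
  rcases hfind : pvA_findS park 0 with _ | ⟨x0, y0⟩
  · rw [hfind] at hsome; simp at hsome
  rcases findS_spec park 0 x0 y0 hfind with ⟨k, hk, hy, hxdef, hxne⟩
  have hxb := find_S_bounds _ hxne
  rcases hdis with rfl | ⟨hrect0, hfindlt⟩
  · simp only [solution, solution_alt, findS_eq, hfind, List.foldl_nil]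
  · have hrect : pvRect park := by
      intro m hm
      have := hrect0 m hm
      simp only [PySem.Str.len_eq] at this
      have : ((pvW park : Nat) : Int) ≤ (m.toList.length : Int) := this
      exact_mod_cast this
    have hx0b : 0 ≤ x0 := by rw [hxdef]; exact hxb.1
    have hx1b : x0 < (pvW park : Int) := by
      have hmem : park.getD k "" ∈ park := by
        rw [List.getD_eq_getElem park _ hk]; exact List.getElem_mem _
      have := hfindlt _ hmem
      simp only [PySem.Str.len_eq] at this
      rw [hxdef]; exact this
    have hy0b : 0 ≤ y0 := by omega
    have hy1b : y0 < (park.length : Int) := by omega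
    simp only [solution, solution_alt, findS_eq, hfind]
    rw [ww_eq park hne]
    rw [fold_eq park hrect routes hroutes (x0, y0) hx0b hx1b hy0b hy1b]
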